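-- pv_equiv track=rewrite | github.com/TerryPei/NNRetrieval | src/data/preprocessing/utils.py | remove_loose_input
-- ===== SOURCE A (Python) =====
-- def remove_loose_input(graph_edges, loose_input):
--     # find nodes connected to a loose input, they need updates
--     nodes_to_update = {}
--     for node_i, node_j in graph_edges:
--         if node_i in loose_input:
--             if node_j not in nodes_to_update:
--                 nodes_to_update[node_j] = '+'.join([node_j, node_i])
--             else:
--                 nodes_to_update[node_j] = '&'.join([nodes_to_update[node_j], node_i])
--         if node_j in loose_input:
--             raise ValueError('%s is not a loose input' % node_j)
--
--     new_graph_edges = []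
--     for node_i, node_j in graph_edges:
--         # if not a loose input, add to new graph
--         if node_i not in loose_input:
--             # check if need update
--             if node_i in nodes_to_update:
--                 node_i = nodes_to_update[node_i]
--             if node_j in nodes_to_update:
--                 node_j = nodes_to_update[node_j]
--             # add node to new graph
--             new_graph_edges.append([node_i, node_j])
--
--     return new_graph_edges
-- ===== SOURCE B (Python) =====
-- def remove_loose_input(graph_edges, loose_input):
--     # reject any edge whose target is itself a loose input
--     for _, node_j in graph_edges:
--         if node_j in loose_input:
--             raise ValueError('%s is not a loose input' % node_j)
--
--     # no precomputed map: a node's new name is derived on demand by scanning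
--     # the edge list for the loose-input sources that feed it
--     def fmt(n):
--         srcs = [i for i, j in graph_edges if j == n and i in loose_input]
--         return n + '+' + '&'.join(srcs) if srcs else n
--
--     return [[fmt(node_i), fmt(node_j)]
--             for node_i, node_j in graph_edges
--             if node_i not in loose_input]
-- ===== Notes on version B (the rewrite author's own statement) =====
-- stated objective: alternative
-- what changed: B eliminates A's precomputed rename dictionary: each output node's new name is derived on demand by one list-comprehension scan of graph_edges for its loose-input sources rendered with a single '+'/'&'.join, trading A's O(E) map build for a per-node rescan.
import Mathlib
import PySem

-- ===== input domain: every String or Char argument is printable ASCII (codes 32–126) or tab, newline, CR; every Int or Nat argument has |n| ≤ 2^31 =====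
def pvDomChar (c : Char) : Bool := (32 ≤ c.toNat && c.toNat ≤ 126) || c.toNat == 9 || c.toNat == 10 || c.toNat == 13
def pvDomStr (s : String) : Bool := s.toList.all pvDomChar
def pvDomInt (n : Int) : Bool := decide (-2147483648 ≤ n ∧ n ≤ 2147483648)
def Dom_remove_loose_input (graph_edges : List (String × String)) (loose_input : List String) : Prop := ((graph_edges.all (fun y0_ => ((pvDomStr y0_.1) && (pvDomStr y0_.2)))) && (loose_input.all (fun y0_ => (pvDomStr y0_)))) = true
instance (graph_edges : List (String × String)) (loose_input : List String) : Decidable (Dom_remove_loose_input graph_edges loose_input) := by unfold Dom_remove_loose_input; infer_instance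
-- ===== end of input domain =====

-- B drops A's precomputed rename dictionary entirely: each output node's name is derived on
-- demand by scanning the edge list for its loose-input sources (alternative decomposition).
-- Both programs raise ValueError when an edge's target is a loose input; Pre_ excludes that.

-- ===== PORT A =====
-- the 'raise ValueError' branch of the first loop never fires inside Pre_ (no edge target is
-- a loose input), so the port carries no raising path.
def remove_loose_input (graph_edges : List (String × String)) (loose_input : List String) : List (List String) :=
  let nodes_to_update : PySem.Dict String String :=
    graph_edges.foldl (fun d e =>
      if loose_input.contains e.1 then
        match PySem.Dict.get? d e.2 with
        | none => PySem.Dict.insert d e.2 (PySem.Str.join "+" [e.2, e.1])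
        | some v => PySem.Dict.insert d e.2 (PySem.Str.join "&" [v, e.1])
      else d) PySem.Dict.empty
  graph_edges.foldl (fun acc e =>
    if !(loose_input.contains e.1) then
      let node_i := match PySem.Dict.get? nodes_to_update e.1 with
        | some v => v
        | none => e.1
      let node_j := match PySem.Dict.get? nodes_to_update e.2 with
        | some v => v
        | none => e.2
      acc ++ [[node_i, node_j]]
    else acc) []

-- ===== PORT B =====
-- Source B's initial raise-check loop never fires inside Pre_ (same exclusion as A's), so the
-- port carries no raising path.
-- fmt(n) of Source B: collect n's loose-input sources by scanning graph_edges, then render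
def pvFmtB (graph_edges : List (String × String)) (loose_input : List String) (n : String) : String :=
  let srcs := (graph_edges.filter (fun e => e.2 == n && loose_input.contains e.1)).map (fun e => e.1)
  if srcs.isEmpty then n else n ++ "+" ++ PySem.Str.join "&" srcs

def remove_loose_input_alt (graph_edges : List (String × String)) (loose_input : List String) : List (List String) :=
  (graph_edges.filter (fun e => !(loose_input.contains e.1))).map
    (fun e => [pvFmtB graph_edges loose_input e.1, pvFmtB graph_edges loose_input e.2])

-- ===== PRECONDITION & SPEC =====
-- Pre_ excludes exactly the inputs where A (and B alike) raises ValueError: an edge whose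
-- target node is itself a loose input.
def Pre_remove_loose_input (graph_edges : List (String × String)) (loose_input : List String) : Prop :=
  ∀ e ∈ graph_edges, e.2 ∉ loose_input
instance (graph_edges : List (String × String)) (loose_input : List String) : Decidable (Pre_remove_loose_input graph_edges loose_input) := by unfold Pre_remove_loose_input; infer_instance

def pvWitness_remove_loose_input : (List (String × String)) × List String :=
  ([("x", "a"), ("a", "b")], ["x"])

def Spec_remove_loose_input (graph_edges : List (String × String)) (loose_input : List String) (out : List (List String)) : Prop := out = remove_loose_input_alt graph_edges loose_input
instance (graph_edges : List (String × String)) (loose_input : List String) (out : List (List String)) : Decidable (Spec_remove_loose_input graph_edges loose_input out) := by unfold Spec_remove_loose_input; infer_instance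

-- ===== CLAIM (what is proved, stated in full; the proofs are below) =====
def Claim_equal_remove_loose_input : Prop := ∀ (graph_edges : List (String × String)) (loose_input : List String), Dom_remove_loose_input graph_edges loose_input → Pre_remove_loose_input graph_edges loose_input → Spec_remove_loose_input graph_edges loose_input (remove_loose_input graph_edges loose_input)

-- ===== LEMMAS AND PROOFS =====

theorem pvCharsJoinSnoc (sep x : List Char) (l : List (List Char)) (h : l ≠ []) :
    PySem.Chars.join sep (l ++ [x]) = PySem.Chars.join sep l ++ sep ++ x := by
  induction l with
  | nil => exact absurd rfl h
  | cons a t ih =>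
    cases t with
    | nil => simp [PySem.Chars.join, List.intercalate]
    | cons b t' =>
      simp only [PySem.Chars.join, List.intercalate, List.cons_append,
        List.intersperse_cons₂, List.flatten_cons] at ih ⊢
      rw [ih (by simp)]
      simp [List.append_assoc]

theorem pvStrJoinSnoc (sep x : String) (l : List String) (h : l ≠ []) :
    PySem.Str.join sep (l ++ [x]) = PySem.Str.join sep l ++ sep ++ x := by
  have hh := pvCharsJoinSnoc sep.toList x.toList (l.map String.toList) (by simpa using h)
  simp only [PySem.Str.join, List.map_append, List.map_cons, List.map_nil] at *
  rw [hh, String.ofList_append, String.ofList_append, String.ofList_toList, String.ofList_toList]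

theorem pvStrJoinPair (sep k x : String) : PySem.Str.join sep [k, x] = k ++ sep ++ x := by
  simp only [PySem.Str.join, PySem.Chars.join, List.intercalate, List.map_cons,
    List.map_nil, List.intersperse_cons₂, List.intersperse_single, List.flatten_cons,
    List.flatten_nil, List.append_nil, String.ofList_append, String.ofList_toList]
  rw [String.append_assoc]

theorem pvStrJoinSingle (sep x : String) : PySem.Str.join sep [x] = x := by
  simp [PySem.Str.join, PySem.Chars.join, List.intercalate]

-- B's contributor list for target k: loose-input sources of edges into k, in edge order
def pvContrib (graph_edges : List (String × String)) (loose_input : List String) (k : String) : List String :=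
  ((graph_edges.filter (fun e => e.2 == k && loose_input.contains e.1)).map (fun e => e.1))

-- formatted value A stores for target k whose contributor list is l
def pvVal (k : String) (l : List String) : String := k ++ "+" ++ PySem.Str.join "&" l

-- an accumulated option-list merged with the contributors of the remaining edges
def pvMerge (o : Option (List String)) (l : List String) : Option (List String) :=
  match o, l with
  | none, [] => none
  | o, l => some (o.getD [] ++ l)

-- characterisation of A's first-pass dictionary by the pure scan pvContrib
theorem pvDictChar (loose_input : List String) (ges : List (String × String))
    (dA : PySem.Dict String String) (f : String → Option (List String))
    (hrel : ∀ k, PySem.Dict.get? dA k = (f k).map (pvVal k))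
    (hne : ∀ k, f k ≠ some []) :
    ∀ k,
      PySem.Dict.get?
        (ges.foldl (fun d e =>
          if loose_input.contains e.1 then
            match PySem.Dict.get? d e.2 with
            | none => PySem.Dict.insert d e.2 (PySem.Str.join "+" [e.2, e.1])
            | some v => PySem.Dict.insert d e.2 (PySem.Str.join "&" [v, e.1])
          else d) dA) k
      = (pvMerge (f k) (pvContrib ges loose_input k)).map (pvVal k) := by
  induction ges generalizing dA f with
  | nil =>
    intro k
    simp only [List.foldl_nil, hrel, pvContrib, List.filter_nil, List.map_nil]
    cases hf : f k <;> simp [pvMerge]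
  | cons e t ih =>
    intro k
    simp only [List.foldl_cons]
    by_cases hc : loose_input.contains e.1
    · rw [if_pos hc]
      have step : ∀ k',
          PySem.Dict.get?
            (match PySem.Dict.get? dA e.2 with
              | none => PySem.Dict.insert dA e.2 (PySem.Str.join "+" [e.2, e.1])
              | some v => PySem.Dict.insert dA e.2 (PySem.Str.join "&" [v, e.1])) k'
          = Option.map (pvVal k') (if k' = e.2 then some ((f e.2).getD [] ++ [e.1]) else f k') := by
        intro k'
        rcases hf : f e.2 with _ | l
        · have hA : PySem.Dict.get? dA e.2 = none := by rw [hrel e.2, hf]; rfl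
          rw [hA]
          rcases eq_or_ne k' e.2 with rfl | hk
          · rw [PySem.Dict.get?_insert_self]
            simp [pvVal, pvStrJoinPair, pvStrJoinSingle]
          · rw [PySem.Dict.get?_insert_of_ne _ _ hk, hrel]
            simp [hk]
        · have hA : PySem.Dict.get? dA e.2 = some (pvVal e.2 l) := by rw [hrel e.2, hf]; rfl
          rw [hA]
          rcases eq_or_ne k' e.2 with rfl | hk
          · rw [PySem.Dict.get?_insert_self, pvStrJoinPair]
            have hsn := pvStrJoinSnoc "&" e.1 l (by rintro rfl; exact hne e.2 hf)
            simp [pvVal, hsn, String.append_assoc]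
          · rw [PySem.Dict.get?_insert_of_ne _ _ hk, hrel]
            simp [hk]
      have hne' : ∀ k',
          (if k' = e.2 then some ((f e.2).getD [] ++ [e.1]) else f k') ≠ some [] := by
        intro k'
        rcases eq_or_ne k' e.2 with rfl | hk
        · simp
        · simpa [hk] using hne k'
      rw [ih _ _ step hne']
      rcases eq_or_ne k e.2 with rfl | hk
      · rw [if_pos rfl]
        have hm : e.1 ∈ loose_input := by simpa using hc
        have hcontrib : pvContrib (e :: t) loose_input e.2 = e.1 :: pvContrib t loose_input e.2 := by
          simp [pvContrib, hm]
        rw [hcontrib]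
        cases hfk : f e.2 <;> simp [pvMerge]
      · have hcontrib : pvContrib (e :: t) loose_input k = pvContrib t loose_input k := by
          have hb : (e.2 == k) = false := by simpa using (Ne.symm hk)
          simp [pvContrib, hb]
        rw [hcontrib, if_neg hk]
    · rw [if_neg hc]
      rw [ih _ _ hrel hne]
      have hm : e.1 ∉ loose_input := by simpa using hc
      have hcontrib : pvContrib (e :: t) loose_input k = pvContrib t loose_input k := by
        simp [pvContrib, hm]
      rw [hcontrib]

theorem pvFmtMatch (ges : List (String × String)) (li : List String) (k : String) :
    (match Option.map (pvVal k) (pvMerge none (pvContrib ges li k)) with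
      | some v => v | none => k) = pvFmtB ges li k := by
  unfold pvFmtB pvVal pvContrib
  cases h : (ges.filter (fun e => e.2 == k && li.contains e.1)).map (fun e => e.1) <;>
    simp [pvMerge, h]

-- ===== VERDICT (by name: the statement is the Claim_ definition above) =====
theorem remove_loose_input_spec : Claim_equal_remove_loose_input := by
  intro ges li _ _
  unfold Spec_remove_loose_input
  simp only [remove_loose_input, remove_loose_input_alt]
  have hchar := pvDictChar li ges PySem.Dict.empty (fun _ => none)
    (by intro k; simp [PySem.Dict.get?_empty]) (by intro k; simp)
  rw [PySem.List.foldl_append_if]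
  simp only [List.nil_append]
  refine List.map_congr_left (fun e _ => ?_)
  simp only [hchar, pvFmtMatch]
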